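-- pv_equiv track=rewrite | github.com/lailacj/structure-of-alternatives | prompts/code/prompts_trigger.py | make_trigger_prompt
-- ===== SOURCE A (Python) =====
-- def make_trigger_prompt(prompt: str, trigger: str) -> str:
--     """
--     Replace the last "only have " or "only has " clause in `prompt` (up to the closing apostrophe)
--     with "only have/has {trigger} and [MASK].'"
--     """
--     # look for both variants
--     variants = ["only have ", "only has "]
--     # find the rightmost occurrence of either
--     idx, variant = max(
--         ((prompt.rfind(v), v) for v in variants),
--         key=lambda x: x[0]
--     )
--     if idx == -1:
--         # no match → return original
--         return prompt
--
--     # find the closing apostrophe after variant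
--     start = idx + len(variant)
--     end_quote = prompt.find("'", start)
--     suffix = prompt[end_quote+1:] if end_quote != -1 else ""
--
--     # rebuild
--     new_mid   = f"{variant}{trigger} and [MASK].'"
--     new_prompt = prompt[:idx] + new_mid + suffix
--     return new_prompt
-- ===== SOURCE B (Python) =====
-- def make_trigger_prompt(prompt: str, trigger: str) -> str:
--     """
--     Replace the last "only have " or "only has " clause in `prompt` (up to the closing apostrophe)
--     with "only have/has {trigger} and [MASK].'"
--     """
--     # Staged left-to-right consumption: repeatedly cut the text at the FIRST
--     # occurrence of either variant, moving the consumed part into `head`, until the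
--     # remaining text contains no further occurrence -- the occurrence just found is
--     # then the last one and gets replaced.  (The variants cannot overlap, so every
--     # later occurrence lies wholly inside the remainder.)
--     head = ""
--     s = prompt
--     while True:
--         i = s.find("only have ")
--         j = s.find("only has ")
--         if i == -1 and j == -1:
--             return prompt  # only reachable on the first round: no occurrence at all
--         if j == -1 or (i != -1 and i < j):
--             idx, variant = i, "only have "
--         else:
--             idx, variant = j, "only has "
--         cut = idx + len(variant)
--         rest = s[cut:]
--         if "only have " not in rest and "only has " not in rest:
--             q = rest.find("'")
--             suffix = rest[q + 1:] if q != -1 else ""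
--             return head + s[:idx] + variant + trigger + " and [MASK].'" + suffix
--         head += s[:cut]
--         s = rest
-- ===== Notes on version B (the rewrite author's own statement) =====
-- stated objective: alternative
-- what changed: A locates the last clause in one shot from the right (rfind per variant combined by max); B instead consumes the string left-to-right in stages, repeatedly cutting at the FIRST occurrence of either variant and accumulating the consumed prefix until the remainder contains no further occurrence, then splices the replacement there.
import Mathlib
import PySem

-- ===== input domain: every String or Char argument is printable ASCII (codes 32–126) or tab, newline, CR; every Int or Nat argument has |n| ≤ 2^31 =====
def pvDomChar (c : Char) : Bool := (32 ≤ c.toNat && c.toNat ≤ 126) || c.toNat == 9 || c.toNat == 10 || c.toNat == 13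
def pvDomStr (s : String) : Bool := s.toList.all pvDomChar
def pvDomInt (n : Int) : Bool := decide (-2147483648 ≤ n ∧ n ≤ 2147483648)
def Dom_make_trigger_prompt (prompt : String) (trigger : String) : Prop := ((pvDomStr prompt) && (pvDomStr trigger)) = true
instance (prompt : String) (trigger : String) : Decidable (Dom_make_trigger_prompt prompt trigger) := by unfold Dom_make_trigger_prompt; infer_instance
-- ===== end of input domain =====

-- B replaces A's one-shot rightmost search (rfind per variant combined by max) with a staged
-- left-to-right loop that repeatedly cuts at the FIRST occurrence of either variant, accumulating
-- the consumed prefix, until the remainder has no further occurrence; alternative structure, same cost.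


-- ===== PORT A =====
-- A on the character list: two rfinds, Python's max-by-first-component (first tuple wins ties), then splice.
def pvCharsA (p t : List Char) : List Char :=
  let r1 := PySem.Chars.rfind p "only have ".toList
  let r2 := PySem.Chars.rfind p "only has ".toList
  -- max(((rfind v, v) for v in variants), key=fst): the first tuple wins ties
  let iv : Int × List Char := if r2 > r1 then (r2, "only has ".toList) else (r1, "only have ".toList)
  if iv.1 = -1 then p
  else
    let start : Int := iv.1 + (iv.2.length : Int)
    let end_quote := PySem.Chars.findFrom p ['\''] start
    let suffix := if end_quote ≠ -1 then PySem.List.slice p (some (end_quote + 1)) none else []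
    PySem.List.slice p none (some iv.1) ++ iv.2 ++ t ++ " and [MASK].'".toList ++ suffix

def make_trigger_prompt (prompt : String) (trigger : String) : String :=
  String.ofList (pvCharsA prompt.toList trigger.toList)

-- ===== PORT B =====
-- termination helper for the loop: the remainder after a positive cut is strictly shorter
theorem pv_rest_len_lt (s : List Char) (a : Int) (h0 : 0 < a) (hs : s ≠ []) :
    (PySem.List.slice s (some a) none).length < s.length := by
  rw [PySem.List.slice_from s (le_of_lt h0), List.length_drop]
  have h1 : a.toNat ≠ 0 := by omega
  have h2 : s.length ≠ 0 := fun h => hs (List.eq_nil_of_length_eq_zero h)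
  omega

-- Source B's while-loop: consume up to the FIRST occurrence of either variant into `head`
-- until the remainder has no further occurrence, then splice the replacement there.
def pvGoB (p0 head s t : List Char) : List Char :=
  let i := PySem.Chars.find s "only have ".toList
  let j := PySem.Chars.find s "only has ".toList
  if i = -1 ∧ j = -1 then p0
  else
    let iv : Int × List Char :=
      if j = -1 ∨ (i ≠ -1 ∧ i < j) then (i, "only have ".toList) else (j, "only has ".toList)
    let cut : Int := iv.1 + (iv.2.length : Int)
    let rest := PySem.List.slice s (some cut) none
    if ¬ PySem.Chars.isIn "only have ".toList rest ∧ ¬ PySem.Chars.isIn "only has ".toList rest then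
      let q := PySem.Chars.find rest ['\'']
      let suffix := if q ≠ -1 then PySem.List.slice rest (some (q + 1)) none else []
      head ++ PySem.List.slice s none (some iv.1) ++ iv.2 ++ t ++ " and [MASK].'".toList ++ suffix
    else
      pvGoB p0 (head ++ PySem.List.slice s none (some cut)) rest t
termination_by s.length
decreasing_by
  rename_i h1 h2
  apply pv_rest_len_lt
  · split
    · show 0 < PySem.Chars.find s "only have ".toList + ("only have ".toList.length : Int)
      have h := PySem.Chars.neg_one_le_find s "only have ".toList
      have hl : "only have ".toList.length = 10 := by decide
      rw [hl]; omega
    · show 0 < PySem.Chars.find s "only has ".toList + ("only has ".toList.length : Int)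
      have h := PySem.Chars.neg_one_le_find s "only has ".toList
      have hl : "only has ".toList.length = 9 := by decide
      rw [hl]; omega
  · intro he
    apply h1
    subst he
    exact ⟨by decide, by decide⟩

def make_trigger_prompt_alt (prompt : String) (trigger : String) : String :=
  String.ofList (pvGoB prompt.toList [] prompt.toList trigger.toList)

-- ===== PRECONDITION & SPEC =====
def Spec_make_trigger_prompt (prompt : String) (trigger : String) (out : String) : Prop := out = make_trigger_prompt_alt prompt trigger
instance (prompt : String) (trigger : String) (out : String) : Decidable (Spec_make_trigger_prompt prompt trigger out) := by unfold Spec_make_trigger_prompt; infer_instance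

-- ===== CLAIM (what is proved, stated in full; the proofs are below) =====
def Claim_equal_make_trigger_prompt : Prop := ∀ (prompt : String) (trigger : String), Dom_make_trigger_prompt prompt trigger → Spec_make_trigger_prompt prompt trigger (make_trigger_prompt prompt trigger)

-- ===== LEMMAS AND PROOFS =====

-- either variant starts at position i of p
def pvHit (p : List Char) (i : Nat) : Prop :=
  "only have ".toList <+: p.drop i ∨ "only has ".toList <+: p.drop i

-- the common splice tail: everything after the first apostrophe of r (empty if none)
def pvSuffix (r : List Char) : List Char :=
  if PySem.Chars.find r ['\''] = -1 then [] else r.drop ((PySem.Chars.find r ['\'']).toNat + 1)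

-- the two variants cannot both start at the same position
theorem pv_not_both {l : List Char} (h1 : "only have ".toList <+: l)
    (h2 : "only has ".toList <+: l) : False := by
  rcases List.prefix_or_prefix_of_prefix h1 h2 with h | h
  · exact absurd h (by decide)
  · exact absurd h (by decide)

-- a nonempty pattern finds no occurrence at or past the length
theorem pv_no_hit_past (p sub : List Char) (hs : sub ≠ []) (k : Nat) (hk : p.length ≤ k) :
    ¬ sub <+: p.drop k := by
  rw [List.drop_eq_nil_of_le hk]
  intro h
  exact hs (List.prefix_nil.mp h)

-- an occurrence of a nonempty pattern at position n forces n + len ≤ p.length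
theorem pv_occ_le (p v : List Char) (n : Nat) (hne : v ≠ []) (hocc : v <+: p.drop n) :
    n + v.length ≤ p.length := by
  have h1 := hocc.length_le
  rw [List.length_drop] at h1
  have h2 : n ≤ p.length := by
    by_contra h
    exact pv_no_hit_past p v hne n (by omega) hocc
  omega

-- hits shift across a drop
theorem pv_hit_shift (p : List Char) (c : Nat) (i : Nat) :
    pvHit (p.drop c) i ↔ pvHit p (c + i) := by
  unfold pvHit
  rw [List.drop_drop]

-- a hit lies strictly inside the list
theorem pv_hit_lt (p : List Char) (i : Nat) (h : pvHit p i) : i < p.length := by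
  rcases h with h | h
  · have h1 := pv_occ_le p _ i (by decide) h
    have h2 : "only have ".toList.length = 10 := by decide
    omega
  · have h1 := pv_occ_le p _ i (by decide) h
    have h2 : "only has ".toList.length = 9 := by decide
    omega

-- a hit forbids find = -1 for that variant
theorem pv_find_ne_of_hit (p w : List Char) (m : Nat) (h : w <+: p.drop m) :
    PySem.Chars.find p w ≠ -1 := by
  intro heq
  rw [PySem.Chars.find_eq_neg_one_iff] at heq
  exact heq ((PySem.Chars.isIn_iff_infix _ _).mp ((PySem.Chars.exists_prefix_drop_iff_isIn _ _).mp ⟨m, h⟩))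

-- any list prefixed by a variant starts with 'o'
theorem pv_variant_head (w : List Char) (hw : w = "only have ".toList ∨ w = "only has ".toList)
    (l : List Char) (hpre : w <+: l) : l[0]? = some 'o' := by
  obtain ⟨t2, rfl⟩ := hpre
  rcases hw with rfl | rfl
  · rw [show ("only have ".toList) = 'o' :: "nly have ".toList by decide]; rfl
  · rw [show ("only has ".toList) = 'o' :: "nly has ".toList by decide]; rfl

-- inside a variant, no position after the start holds 'o'
theorem pv_variant_no_o (v : List Char) (hv : v = "only have ".toList ∨ v = "only has ".toList)
    (d : Nat) (h1 : 1 ≤ d) (h2 : d < v.length) : v[d]? ≠ some 'o' := by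
  rcases hv with rfl | rfl
  · have hlen : ("only have ".toList).length = 10 := by decide
    have h2' : d < 10 := by omega
    interval_cases d <;> decide
  · have hlen : ("only has ".toList).length = 9 := by decide
    have h2' : d < 9 := by omega
    interval_cases d <;> decide

-- no variant occurrence can start strictly inside another variant occurrence
theorem pv_overlap (p : List Char) (v : List Char)
    (hv : v = "only have ".toList ∨ v = "only has ".toList)
    (n k : Nat) (hocc : v <+: p.drop n) (h1 : n < k) (h2 : k < n + v.length) :
    ¬ pvHit p k := by
  intro hhit
  obtain ⟨tl, htl⟩ := hocc
  have hvne : v ≠ [] := by rcases hv with rfl | rfl <;> decide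
  have hnp : n ≤ p.length := by
    by_contra h
    exact pv_no_hit_past p v hvne n (by omega) ⟨tl, htl⟩
  have hdrop : p.drop k = v.drop (k - n) ++ tl := by
    have e1 : p.drop k = (p.drop n).drop (k - n) := by
      rw [List.drop_drop]
      congr 1
      omega
    rw [e1, ← htl, List.drop_append_of_le_length (by omega)]
  have ho : (p.drop k)[0]? = some 'o' := by
    rcases hhit with hw | hw
    · exact pv_variant_head _ (Or.inl rfl) _ hw
    · exact pv_variant_head _ (Or.inr rfl) _ hw
  rw [hdrop, List.getElem?_append_left (by rw [List.length_drop]; omega), List.getElem?_drop] at ho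
  exact pv_variant_no_o v hv (k - n) (by omega) (by omega) (by simpa using ho)

-- characterisation of rfind's downward scan
theorem pv_go_cases (s sub : List Char) (j : Nat) :
    (PySem.Chars.rfind.go s sub j = -1 ∧ ∀ i, i ≤ j → ¬ sub <+: s.drop i) ∨
    (∃ k : Nat, k ≤ j ∧ PySem.Chars.rfind.go s sub j = (k : Int) ∧ sub <+: s.drop k ∧
      ∀ i, k < i → i ≤ j → ¬ sub <+: s.drop i) := by
  induction j with
  | zero =>
    rw [PySem.Chars.rfind.go]
    by_cases h : sub <+: s
    · right
      refine ⟨0, le_refl 0, ?_, by simpa using h, by omega⟩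
      simp [List.isPrefixOf_iff_prefix, h]
    · left
      constructor
      · simp [List.isPrefixOf_iff_prefix, h]
      · intro i hi
        interval_cases i
        simpa using h
  | succ j ih =>
    rw [PySem.Chars.rfind.go]
    by_cases h : sub <+: s.drop (j + 1)
    · right
      refine ⟨j + 1, le_refl _, ?_, h, by omega⟩
      simp [List.isPrefixOf_iff_prefix, h]
    · rw [if_neg (by simp [List.isPrefixOf_iff_prefix, h])]
      rcases ih with ⟨hgo, hnone⟩ | ⟨k, hk, hgo, hpre, hmax⟩
      · left
        refine ⟨hgo, ?_⟩
        intro i hi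
        rcases Nat.lt_or_ge i (j + 1) with hlt | hge
        · exact hnone i (by omega)
        · have : i = j + 1 := by omega
          subst this; exact h
      · right
        refine ⟨k, by omega, hgo, hpre, ?_⟩
        intro i hki hij
        rcases Nat.lt_or_ge i (j + 1) with hlt | hge
        · exact hmax i hki (by omega)
        · have : i = j + 1 := by omega
          subst this; exact h

-- rfind of a nonempty pattern: -1 with no occurrence, or the greatest occurrence
theorem pv_rfind_cases (p sub : List Char) (hs : sub ≠ []) :
    (PySem.Chars.rfind p sub = -1 ∧ ∀ i, ¬ sub <+: p.drop i) ∨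
    (∃ k : Nat, PySem.Chars.rfind p sub = (k : Int) ∧ sub <+: p.drop k ∧
      ∀ i, k < i → ¬ sub <+: p.drop i) := by
  rw [PySem.Chars.rfind]
  rcases pv_go_cases p sub p.length with ⟨hgo, hnone⟩ | ⟨k, hk, hgo, hpre, hmax⟩
  · left
    refine ⟨hgo, fun i => ?_⟩
    rcases Nat.lt_or_ge i (p.length + 1) with hlt | hge
    · exact hnone i (by omega)
    · exact pv_no_hit_past p sub hs i (by omega)
  · right
    refine ⟨k, hgo, hpre, fun i hki => ?_⟩
    rcases Nat.lt_or_ge i (p.length + 1) with hlt | hge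
    · exact hmax i hki (by omega)
    · exact pv_no_hit_past p sub hs i (by omega)

-- rfind equals the position of an occurrence that nothing exceeds
theorem pv_rfind_eq_of (p sub : List Char) (hs : sub ≠ []) (k : Nat)
    (hocc : sub <+: p.drop k) (hmax : ∀ i, k < i → ¬ sub <+: p.drop i) :
    PySem.Chars.rfind p sub = (k : Int) := by
  rcases pv_rfind_cases p sub hs with ⟨hgo, hnone⟩ | ⟨k', hgo, hpre, hmax'⟩
  · exact absurd hocc (hnone k)
  · have : k' = k := by
      rcases Nat.lt_trichotomy k' k with h | h | h
      · exact absurd hocc (hmax' k h)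
      · exact h
      · exact absurd hpre (hmax k' h)
    rw [hgo, this]

theorem pv_rfind_eq_neg_one (p sub : List Char) (hs : sub ≠ [])
    (hnone : ∀ i, ¬ sub <+: p.drop i) : PySem.Chars.rfind p sub = -1 := by
  rcases pv_rfind_cases p sub hs with ⟨hgo, _⟩ | ⟨k, _, hpre, _⟩
  · exact hgo
  · exact absurd hpre (hnone k)

-- what A returns when the rightmost combined occurrence is (k, v)
theorem pv_A_spec (p t : List Char) (k : Nat) (v : List Char)
    (hv : v = "only have ".toList ∨ v = "only has ".toList)
    (hocc : v <+: p.drop k) (hmax : ∀ i, k < i → ¬ pvHit p i) :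
    pvCharsA p t = p.take k ++ v ++ t ++ " and [MASK].'".toList ++ pvSuffix (p.drop (k + v.length)) := by
  have hvne : v ≠ [] := by rcases hv with rfl | rfl <;> decide
  have hkl : k + v.length ≤ p.length := pv_occ_le p v k hvne hocc
  have hcast : (k : Int) + (v.length : Int) = ((k + v.length : Nat) : Int) := by push_cast; ring
  have hsfx : (if PySem.Chars.findFrom p ['\''] ((k : Int) + (v.length : Int)) ≠ -1
      then PySem.List.slice p (some (PySem.Chars.findFrom p ['\''] ((k : Int) + (v.length : Int)) + 1)) none
      else []) = pvSuffix (p.drop (k + v.length)) := by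
    rw [hcast, PySem.Chars.findFrom_natCast p ['\''] (k + v.length) hkl]
    by_cases hq : PySem.Chars.find (p.drop (k + v.length)) ['\''] = -1
    · rw [if_pos hq, if_neg (not_not_intro rfl)]
      unfold pvSuffix
      rw [if_pos hq]
    · have h0 : 0 ≤ PySem.Chars.find (p.drop (k + v.length)) ['\''] := by
        have := PySem.Chars.neg_one_le_find (p.drop (k + v.length)) ['\'']
        omega
      rw [if_neg hq,
          if_pos (show ((k + v.length : Nat) : Int) + PySem.Chars.find (p.drop (k + v.length)) ['\''] ≠ -1 by omega),
          PySem.List.slice_from p (by omega)]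
      unfold pvSuffix
      rw [if_neg hq, List.drop_drop]
      congr 1
      omega
  rcases hv with rfl | rfl
  · have h1 : PySem.Chars.rfind p "only have ".toList = (k : Int) :=
      pv_rfind_eq_of p _ (by decide) k hocc (fun i hi hp => hmax i hi (Or.inl hp))
    have h2 : PySem.Chars.rfind p "only has ".toList < (k : Int) := by
      rcases pv_rfind_cases p "only has ".toList (by decide) with ⟨hgo, _⟩ | ⟨k2, hgo, hpre, _⟩
      · rw [hgo]; omega
      · rcases Nat.lt_trichotomy k2 k with hlt | he | hgt
        · rw [hgo]; exact_mod_cast hlt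
        · subst he; exact (pv_not_both hocc hpre).elim
        · exact (hmax k2 hgt (Or.inr hpre)).elim
    have hne2' : ¬ ((k : Int) = -1) := by omega
    have hgtk : ¬ (PySem.Chars.rfind p "only has ".toList > (k : Int)) := by omega
    simp only [pvCharsA, if_neg hgtk, if_neg hne2', h1,
      PySem.List.slice_to_natCast, hsfx]
  · have h2 : PySem.Chars.rfind p "only has ".toList = (k : Int) :=
      pv_rfind_eq_of p _ (by decide) k hocc (fun i hi hp => hmax i hi (Or.inr hp))
    have h1 : PySem.Chars.rfind p "only have ".toList < (k : Int) := by
      rcases pv_rfind_cases p "only have ".toList (by decide) with ⟨hgo, _⟩ | ⟨k1, hgo, hpre, _⟩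
      · rw [hgo]; omega
      · rcases Nat.lt_trichotomy k1 k with hlt | he | hgt
        · rw [hgo]; exact_mod_cast hlt
        · subst he; exact (pv_not_both hpre hocc).elim
        · exact (hmax k1 hgt (Or.inl hpre)).elim
    have hne2' : ¬ ((k : Int) = -1) := by omega
    have hgtk : (k : Int) > PySem.Chars.rfind p "only have ".toList := by omega
    simp only [pvCharsA, if_pos hgtk, if_neg hne2', h2,
      PySem.List.slice_to_natCast, hsfx]

-- A returns p when no variant occurs
theorem pv_A_none (p t : List Char) (hnone : ∀ i, ¬ pvHit p i) : pvCharsA p t = p := by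
  have h1 : PySem.Chars.rfind p "only have ".toList = -1 :=
    pv_rfind_eq_neg_one p _ (by decide) (fun i h => hnone i (Or.inl h))
  have h2 : PySem.Chars.rfind p "only has ".toList = -1 :=
    pv_rfind_eq_neg_one p _ (by decide) (fun i h => hnone i (Or.inr h))
  simp only [pvCharsA, h1, h2]
  norm_num

-- a list with a hit has a rightmost hit
theorem pv_rightmost (p : List Char) (hex : ∃ i, pvHit p i) :
    ∃ k v, (v = "only have ".toList ∨ v = "only has ".toList) ∧ v <+: p.drop k ∧
      ∀ i, k < i → ¬ pvHit p i := by
  have hbr : ∀ i, pvHit p i ↔ (PySem.Chars.startswith (p.drop i) "only have ".toList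
      || PySem.Chars.startswith (p.drop i) "only has ".toList) = true := by
    intro i
    rw [Bool.or_eq_true, PySem.Chars.startswith_iff, PySem.Chars.startswith_iff]
    exact Iff.rfl
  obtain ⟨i0, hi0⟩ := hex
  have hkP := Nat.findGreatest_spec (P := fun i => (PySem.Chars.startswith (p.drop i) "only have ".toList
      || PySem.Chars.startswith (p.drop i) "only has ".toList) = true)
    (Nat.le_of_lt (pv_hit_lt p i0 hi0)) ((hbr i0).mp hi0)
  have hkhit := (hbr _).mpr hkP
  have hmax : ∀ i, Nat.findGreatest (fun i => (PySem.Chars.startswith (p.drop i) "only have ".toList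
      || PySem.Chars.startswith (p.drop i) "only has ".toList) = true) p.length < i → ¬ pvHit p i := by
    intro i hk hh
    exact Nat.findGreatest_is_greatest hk (Nat.le_of_lt (pv_hit_lt p i hh)) ((hbr i).mp hh)
  rcases hkhit with h | h
  · exact ⟨_, _, Or.inl rfl, h, hmax⟩
  · exact ⟨_, _, Or.inr rfl, h, hmax⟩

-- the selection step of B picks the leftmost combined occurrence
theorem pv_select (s : List Char)
    (h : ¬ (PySem.Chars.find s "only have ".toList = -1 ∧ PySem.Chars.find s "only has ".toList = -1)) :
    ∃ (In0 : Nat) (v0 : List Char),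
      (if PySem.Chars.find s "only has ".toList = -1 ∨
          (PySem.Chars.find s "only have ".toList ≠ -1 ∧
            PySem.Chars.find s "only have ".toList < PySem.Chars.find s "only has ".toList)
       then (PySem.Chars.find s "only have ".toList, "only have ".toList)
       else (PySem.Chars.find s "only has ".toList, "only has ".toList)) = ((In0 : Int), v0) ∧
      (v0 = "only have ".toList ∨ v0 = "only has ".toList) ∧
      v0 <+: s.drop In0 ∧ ∀ m, m < In0 → ¬ pvHit s m := by
  have hi1 := PySem.Chars.neg_one_le_find s "only have ".toList
  have hj1 := PySem.Chars.neg_one_le_find s "only has ".toList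
  by_cases hc : PySem.Chars.find s "only has ".toList = -1 ∨
      (PySem.Chars.find s "only have ".toList ≠ -1 ∧
        PySem.Chars.find s "only have ".toList < PySem.Chars.find s "only has ".toList)
  · have hine : PySem.Chars.find s "only have ".toList ≠ -1 := by
      rcases hc with hc | hc
      · exact fun he => h ⟨he, hc⟩
      · exact hc.1
    have hi0 : 0 ≤ PySem.Chars.find s "only have ".toList := by omega
    have hsp := PySem.Chars.find_spec hi0
    refine ⟨(PySem.Chars.find s "only have ".toList).toNat, "only have ".toList, ?_, Or.inl rfl, hsp.1, ?_⟩
    · rw [if_pos hc, Int.toNat_of_nonneg hi0]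
    · intro m hm hhit
      rcases hhit with hw | hw
      · exact hsp.2 m hm hw
      · rcases hc with hc | hc
        · exact pv_find_ne_of_hit s _ m hw hc
        · have hj0 : 0 ≤ PySem.Chars.find s "only has ".toList := by omega
          have hsp2 := PySem.Chars.find_spec hj0
          exact hsp2.2 m (by omega) hw
  · have hjne : PySem.Chars.find s "only has ".toList ≠ -1 := fun he => hc (Or.inl he)
    have hile : PySem.Chars.find s "only have ".toList ≠ -1 →
        ¬ PySem.Chars.find s "only have ".toList < PySem.Chars.find s "only has ".toList :=
      fun hne hlt => hc (Or.inr ⟨hne, hlt⟩)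
    have hj0 : 0 ≤ PySem.Chars.find s "only has ".toList := by omega
    have hsp2 := PySem.Chars.find_spec hj0
    refine ⟨(PySem.Chars.find s "only has ".toList).toNat, "only has ".toList, ?_, Or.inr rfl, hsp2.1, ?_⟩
    · rw [if_neg hc, Int.toNat_of_nonneg hj0]
    · intro m hm hhit
      rcases hhit with hw | hw
      · have hine : PySem.Chars.find s "only have ".toList ≠ -1 := pv_find_ne_of_hit s _ m hw
        have hi0 : 0 ≤ PySem.Chars.find s "only have ".toList := by omega
        have hsp := PySem.Chars.find_spec hi0
        have hge := hile hine
        exact hsp.2 m (by omega) hw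
      · exact hsp2.2 m hm hw

-- loop invariant for B: with a rightmost hit (k, v) in s, the loop returns head ++ spliced s
theorem pv_goB_spec (n : Nat) : ∀ (s : List Char), s.length ≤ n →
    ∀ (p0 head t : List Char) (k : Nat) (v : List Char),
    (v = "only have ".toList ∨ v = "only has ".toList) → v <+: s.drop k →
    (∀ i, k < i → ¬ pvHit s i) →
    pvGoB p0 head s t = head ++ s.take k ++ v ++ t ++ " and [MASK].'".toList ++ pvSuffix (s.drop (k + v.length)) := by
  induction n with
  | zero =>
    intro s hsn p0 head t k v hv hocc hmax
    have hs : s = [] := by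
      cases s with
      | nil => rfl
      | cons a l => simp at hsn
    subst hs
    rw [List.drop_nil] at hocc
    have hnil := List.prefix_nil.mp hocc
    rcases hv with rfl | rfl <;> exact absurd hnil (by decide)
  | succ n ih =>
    intro s hsn p0 head t k v hv hocc hmax
    have hvne : v ≠ [] := by rcases hv with rfl | rfl <;> decide
    have hvlen : 9 ≤ v.length := by rcases hv with rfl | rfl <;> decide
    have hkl : k + v.length ≤ s.length := pv_occ_le s v k hvne hocc
    have hhit : pvHit s k := by
      rcases hv with rfl | rfl
      · exact Or.inl hocc
      · exact Or.inr hocc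
    have hnotboth : ¬ (PySem.Chars.find s "only have ".toList = -1 ∧ PySem.Chars.find s "only has ".toList = -1) := by
      rintro ⟨h1, h2⟩
      rcases hhit with hw | hw
      · exact pv_find_ne_of_hit s _ k hw h1
      · exact pv_find_ne_of_hit s _ k hw h2
    obtain ⟨In0, v0, hpair, hv0, hfirst, hminv⟩ := pv_select s hnotboth
    have hv0ne : v0 ≠ [] := by rcases hv0 with rfl | rfl <;> decide
    have hv0len : 9 ≤ v0.length := by rcases hv0 with rfl | rfl <;> decide
    have hfl : In0 + v0.length ≤ s.length := pv_occ_le s v0 In0 hv0ne hfirst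
    have hcast : (In0 : Int) + (v0.length : Int) = ((In0 + v0.length : Nat) : Int) := by push_cast; ring
    rw [pvGoB]
    simp only [if_neg hnotboth, hpair, hcast, PySem.List.slice_from_natCast, PySem.List.slice_to_natCast]
    set rest := s.drop (In0 + v0.length) with hrest
    by_cases hlast : ¬ PySem.Chars.isIn "only have ".toList rest ∧ ¬ PySem.Chars.isIn "only has ".toList rest
    · rw [if_pos hlast]
      have hkIn : k = In0 := by
        have hle : In0 ≤ k := by
          by_contra hlt
          exact hminv k (by omega) hhit
        rcases Nat.eq_or_lt_of_le hle with he | hgt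
        · omega
        · exfalso
          rcases Nat.lt_or_ge k (In0 + v0.length) with hlt2 | hge2
          · exact pv_overlap s v0 hv0 In0 k hfirst hgt hlt2 hhit
          · have hsh : pvHit rest (k - (In0 + v0.length)) := by
              rw [hrest, pv_hit_shift, show (In0 + v0.length) + (k - (In0 + v0.length)) = k by omega]
              exact hhit
            rcases hsh with hw | hw
            · exact hlast.1 ((PySem.Chars.exists_prefix_drop_iff_isIn _ _).mp ⟨_, hw⟩)
            · exact hlast.2 ((PySem.Chars.exists_prefix_drop_iff_isIn _ _).mp ⟨_, hw⟩)
      have hfirst' : v0 <+: s.drop k := by rw [hkIn]; exact hfirst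
      have hveq : v = v0 := by
        rcases hv with rfl | rfl <;> rcases hv0 with rfl | rfl
        · rfl
        · exact (pv_not_both hocc hfirst').elim
        · exact (pv_not_both hfirst' hocc).elim
        · rfl
      have hsfx : (if PySem.Chars.find rest ['\''] ≠ -1
          then PySem.List.slice rest (some (PySem.Chars.find rest ['\''] + 1)) none
          else []) = pvSuffix rest := by
        by_cases hq : PySem.Chars.find rest ['\''] = -1
        · rw [if_neg (not_not_intro hq)]
          unfold pvSuffix
          rw [if_pos hq]
        · have h0 : 0 ≤ PySem.Chars.find rest ['\''] := by
            have := PySem.Chars.neg_one_le_find rest ['\'']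
            omega
          rw [if_pos hq, PySem.List.slice_from rest (by omega)]
          unfold pvSuffix
          rw [if_neg hq]
          congr 1
          omega
      rw [hsfx, hveq, hkIn]
    · rw [if_neg hlast]
      have hex : ∃ m, pvHit rest m := by
        rcases not_and_or.mp hlast with hh | hh
        · obtain ⟨m, hm⟩ := (PySem.Chars.exists_prefix_drop_iff_isIn _ _).mpr (not_not.mp hh)
          exact ⟨m, Or.inl hm⟩
        · obtain ⟨m, hm⟩ := (PySem.Chars.exists_prefix_drop_iff_isIn _ _).mpr (not_not.mp hh)
          exact ⟨m, Or.inr hm⟩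
      obtain ⟨m, hm⟩ := hex
      have hkge : In0 + v0.length ≤ k := by
        have hsh : pvHit s ((In0 + v0.length) + m) := by
          rw [← pv_hit_shift, ← hrest]
          exact hm
        by_contra hcon
        exact hmax _ (by omega) hsh
      have hrlen : rest.length ≤ n := by
        rw [hrest, List.length_drop]
        omega
      have hocc' : v <+: rest.drop (k - (In0 + v0.length)) := by
        rw [hrest, List.drop_drop, show (In0 + v0.length) + (k - (In0 + v0.length)) = k by omega]
        exact hocc
      have hmax' : ∀ i, (k - (In0 + v0.length)) < i → ¬ pvHit rest i := by
        intro i hi hh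
        have hsh : pvHit s ((In0 + v0.length) + i) := by
          rw [← pv_hit_shift, ← hrest]
          exact hh
        exact hmax _ (by omega) hsh
      rw [ih rest hrlen p0 (head ++ s.take (In0 + v0.length)) t (k - (In0 + v0.length)) v hv hocc' hmax']
      have htake : s.take k = s.take (In0 + v0.length) ++ rest.take (k - (In0 + v0.length)) := by
        conv_lhs => rw [show k = (In0 + v0.length) + (k - (In0 + v0.length)) by omega]
        rw [List.take_add, hrest]
      have hdrop2 : rest.drop ((k - (In0 + v0.length)) + v.length) = s.drop (k + v.length) := by
        rw [hrest, List.drop_drop, show (In0 + v0.length) + ((k - (In0 + v0.length)) + v.length) = k + v.length by omega]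
      rw [htake, hdrop2]
      simp [List.append_assoc]

-- B returns the original string when s has no hit
theorem pv_goB_none (p0 head s t : List Char) (hnone : ∀ i, ¬ pvHit s i) :
    pvGoB p0 head s t = p0 := by
  have h1 : PySem.Chars.find s "only have ".toList = -1 := by
    rw [PySem.Chars.find_eq_neg_one_iff]
    intro hinf
    obtain ⟨m, hm⟩ := (PySem.Chars.exists_prefix_drop_iff_isIn _ _).mpr
      ((PySem.Chars.isIn_iff_infix _ _).mpr hinf)
    exact hnone m (Or.inl hm)
  have h2 : PySem.Chars.find s "only has ".toList = -1 := by
    rw [PySem.Chars.find_eq_neg_one_iff]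
    intro hinf
    obtain ⟨m, hm⟩ := (PySem.Chars.exists_prefix_drop_iff_isIn _ _).mpr
      ((PySem.Chars.isIn_iff_infix _ _).mpr hinf)
    exact hnone m (Or.inr hm)
  rw [pvGoB]
  simp only [if_pos (And.intro h1 h2)]

-- ===== VERDICT (by name: the statement is the Claim_ definition above) =====
theorem make_trigger_prompt_spec : Claim_equal_make_trigger_prompt := by
  intro prompt trigger _
  show make_trigger_prompt prompt trigger = make_trigger_prompt_alt prompt trigger
  unfold make_trigger_prompt make_trigger_prompt_alt
  refine congrArg String.ofList ?_
  by_cases hex : ∃ i, pvHit prompt.toList i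
  · obtain ⟨k, v, hv, hocc, hmax⟩ := pv_rightmost prompt.toList hex
    rw [pv_A_spec prompt.toList trigger.toList k v hv hocc hmax,
        pv_goB_spec prompt.toList.length prompt.toList le_rfl prompt.toList [] trigger.toList k v hv hocc hmax]
    simp
  · rw [not_exists] at hex
    rw [pv_A_none prompt.toList trigger.toList hex,
        pv_goB_none prompt.toList [] prompt.toList trigger.toList hex]
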